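-- pv_equiv track=rewrite | github.com/SoftwareDeveloper007/Scraping-craigslist | craigslist_scrapy.py | correct_data
-- ===== SOURCE A (Python) =====
-- def correct_data(data):
--     while '/' in data:
--         data = data.replace('/', '')
--     while '(' in data:
--         data = data.replace('(', '')
--     while ')' in data:
--         data = data.replace(')', '')
--     return data
-- ===== SOURCE B (Python) =====
-- def correct_data(data):
--     return ''.join(c for c in data if c not in '/()')
-- ===== Notes on version B (the rewrite author's own statement) =====
-- stated objective: idiomatic
-- what changed: Replaced three whole-string while/replace passes with a single character-filtering pass joining the kept characters.
import Mathlib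
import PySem

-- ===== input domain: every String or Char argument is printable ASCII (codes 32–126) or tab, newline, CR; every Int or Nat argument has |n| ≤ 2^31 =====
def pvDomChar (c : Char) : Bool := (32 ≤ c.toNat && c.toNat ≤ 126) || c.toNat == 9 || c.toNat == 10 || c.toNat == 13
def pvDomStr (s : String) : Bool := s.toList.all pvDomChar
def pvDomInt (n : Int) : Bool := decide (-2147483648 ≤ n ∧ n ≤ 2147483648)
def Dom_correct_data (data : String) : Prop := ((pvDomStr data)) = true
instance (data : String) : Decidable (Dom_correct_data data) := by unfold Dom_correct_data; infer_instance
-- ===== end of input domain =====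

-- B replaces A's three while/replace passes with a single character-filtering pass (idiomatic; same cost).

-- ===== PORT A =====
-- termination lemmas for the while loops (cited by the port's decreasing_by)
theorem pvReplaceGoFilter (c : Char) : ∀ (fuel : Nat) (l acc : List Char), l.length ≤ fuel →
    PySem.Chars.replace.go [c] [] fuel l acc = acc.reverse ++ l.filter (fun x => !(x == c)) := by
  intro fuel
  induction fuel with
  | zero => intro l acc h; cases l with
    | nil => simp [PySem.Chars.replace.go]
    | cons a t => simp at h
  | succ n ih =>
    intro l acc h
    cases l with
    | nil => simp [PySem.Chars.replace.go]
    | cons a t =>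
      by_cases hc : a = c
      · subst hc
        have : List.isPrefixOf [a] (a :: t) = true := by simp [List.isPrefixOf]
        simp only [PySem.Chars.replace.go, this, if_pos]
        rw [show List.drop [a].length (a :: t) = t from rfl,
            show ([] : List Char).reverse ++ acc = acc from rfl]
        rw [ih t acc (by simpa using h)]
        simp
      · have : List.isPrefixOf [c] (a :: t) = false := by
          simp [List.isPrefixOf]; exact fun h' => absurd h'.symm hc
        simp only [PySem.Chars.replace.go, this]
        rw [ih t (a :: acc) (by simpa using Nat.le_of_succ_le_succ h)]
        simp [hc]

theorem pvReplaceSingletonFilter (c : Char) (s : List Char) :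
    PySem.Chars.replace s [c] [] = s.filter (fun x => !(x == c)) := by
  have h := pvReplaceGoFilter c s.length s [] (le_refl _)
  simpa [PySem.Chars.replace, List.isEmpty] using h

theorem pvReplaceShrinks (c : Char) (s : String)
    (h : PySem.Str.isIn (String.ofList [c]) s = true) :
    (PySem.Str.replace s (String.ofList [c]) "").toList.length < s.toList.length := by
  have hmem : c ∈ s.toList := by
    have := (PySem.Str.isIn_iff_infix (String.ofList [c]) s).mp h
    simp at this
    exact this.mem (by simp)
  rw [PySem.Str.toList_replace]
  simp only [String.toList_ofList]
  rw [show ("" : String).toList = [] from rfl, pvReplaceSingletonFilter]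
  refine List.length_filter_lt_length_iff_exists.mpr ?_
  exact ⟨c, hmem, by simp⟩

-- one Python 'while c in data: data = data.replace(c, "")' loop
def pvWhileRemove (c : Char) (s : String) : String :=
  if h : PySem.Str.isIn (String.ofList [c]) s = true then
    pvWhileRemove c (PySem.Str.replace s (String.ofList [c]) "")
  else s
termination_by s.toList.length
decreasing_by exact pvReplaceShrinks c s h

def correct_data (data : String) : String :=
  pvWhileRemove ')' (pvWhileRemove '(' (pvWhileRemove '/' data))

-- ===== PORT B =====
def correct_data_alt (data : String) : String :=
  String.ofList (data.toList.filter (fun c => !(PySem.Str.isIn (String.ofList [c]) "/()")))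

-- ===== PRECONDITION & SPEC =====
def Spec_correct_data (data : String) (out : String) : Prop := out = correct_data_alt data
instance (data : String) (out : String) : Decidable (Spec_correct_data data out) := by unfold Spec_correct_data; infer_instance

-- ===== CLAIM (what is proved, stated in full; the proofs are below) =====
def Claim_equal_correct_data : Prop := ∀ (data : String), Dom_correct_data data → Spec_correct_data data (correct_data data)

-- ===== LEMMAS AND PROOFS =====

theorem pvSingletonInfix {a : Char} {l : List Char} : [a] <:+: l ↔ a ∈ l := by
  constructor
  · intro h; exact h.mem (by simp)
  · intro h
    obtain ⟨s, t, rfl⟩ := List.append_of_mem h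
    exact ⟨s, t, by simp⟩

set_option maxHeartbeats 1000000 in
theorem pvWhileRemove_eq (c : Char) (s : String) :
    pvWhileRemove c s = String.ofList (s.toList.filter (fun x => !(x == c))) := by
  generalize hn : s.toList.length = n
  induction n using Nat.strong_induction_on generalizing s with
  | _ n ih =>
  by_cases h : PySem.Str.isIn (String.ofList [c]) s = true
  · rw [pvWhileRemove, dif_pos h]
    rw [ih _ (hn ▸ pvReplaceShrinks c s h) _ rfl]
    congr 1
    rw [PySem.Str.toList_replace]
    simp only [String.toList_ofList]
    rw [show ("" : String).toList = [] from rfl, pvReplaceSingletonFilter]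
    simp [List.filter_filter]
  · rw [pvWhileRemove, dif_neg h]
    have hmem : c ∉ s.toList := by
      intro hc
      exact h ((PySem.Str.isIn_iff_infix _ _).mpr (by simpa using pvSingletonInfix.mpr hc))
    rw [List.filter_eq_self.mpr (fun x hx => by
      simp only [Bool.not_eq_eq_eq_not, Bool.not_true, beq_eq_false_iff_ne]
      exact fun hxc => hmem (hxc ▸ hx))]
    exact (String.ofList_toList).symm

-- ===== VERDICT (by name: the statement is the Claim_ definition above) =====
theorem correct_data_spec : Claim_equal_correct_data := by
  intro data _
  unfold Spec_correct_data correct_data correct_data_alt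
  rw [pvWhileRemove_eq, pvWhileRemove_eq, pvWhileRemove_eq]
  simp only [String.toList_ofList, List.filter_filter]
  congr 1
  apply List.filter_congr
  intro x _
  have : PySem.Str.isIn (String.ofList [x]) "/()" = (x == '/' || x == '(' || x == ')') := by
    by_cases h : x = '/' ∨ x = '(' ∨ x = ')'
    · rcases h with rfl | rfl | rfl <;> decide
    · push Not at h
      obtain ⟨h1, h2, h3⟩ := h
      have : ¬ PySem.Str.isIn (String.ofList [x]) "/()" = true := by
        rw [PySem.Str.isIn_iff_infix]
        simp only [String.toList_ofList]
        intro hinf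
        have := pvSingletonInfix.mp (by simpa using hinf)
        simp at this
        rcases this with rfl | rfl | rfl <;> simp_all
      simp only [Bool.not_eq_true] at this
      rw [this]
      simp [h1, h2, h3]
  rw [this]
  cases hx1 : x == '/' <;> cases hx2 : x == '(' <;> cases hx3 : x == ')' <;> simp_all
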